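-- pv_equiv track=rewrite | github.com/ilzozvye1/Ting_Downloader | ting13/ting13_downloader.py | _pick_best_audio_url
-- ===== SOURCE A (Python) =====
-- from typing import List, Optional, Tuple, Dict
--
-- def _is_trusted_audio_url(url: str) -> bool:
--     """判断音频 URL 是否来自 ting13 的可信音频 CDN"""
--     trusted_domains = [
--         "ysxs.top",         # ting13 主要音频 CDN
--         "ting13.cc",        # ting13 自身域名
--         "tingchina.com",    # 听中国
--     ]
--     url_lower = url.lower()
--     return any(domain in url_lower for domain in trusted_domains)
--
-- def _is_blacklisted_audio_url(url: str) -> bool: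
--     """判断音频 URL 是否来自第三方广告/嵌入（应排除）"""
--     blacklisted_domains = [
--         "xmcdn.com",        # 喜马拉雅 CDN
--         "ximalaya.com",     # 喜马拉雅
--         "qtfm.cn",          # 蜻蜓 FM
--         "lrts.me",          # 荔枝 FM
--         "kaolafm.net",      # 考拉 FM
--         "kugou.com",        # 酷狗
--         "kuwo.cn",          # 酷我
--         "163.com",          # 网易云
--         "qqmusic.qq.com",   # QQ 音乐
--         "douyin.com",       # 抖音
--         "bytedance",        # 字节跳动
--         "googlesyndication",# Google 广告
--         "googleads",        # Google 广告
--     ]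
--     url_lower = url.lower()
--     return any(domain in url_lower for domain in blacklisted_domains)
--
-- def _pick_best_audio_url(audio_urls: List[str]) -> Optional[str]:
--     """
--     从候选音频 URL 列表中选出最佳 URL
--
--     优先级：
--     1. 可信域名的 .mp3
--     2. 可信域名的其他格式
--     3. 非黑名单域名的 .mp3
--     4. 非黑名单域名的其他格式
--     5. 放弃黑名单域名的 URL（不返回）
--     """
--     if not audio_urls:
--         return None
--
--     # 排除黑名单
--     clean_urls = [u for u in audio_urls if not _is_blacklisted_audio_url(u)]
--     # 可信域名
--     trusted_urls = [u for u in clean_urls if _is_trusted_audio_url(u)]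
--
--     # 优先级 1: 可信 + mp3
--     trusted_mp3 = [u for u in trusted_urls if ".mp3" in u]
--     if trusted_mp3:
--         return trusted_mp3[0]
--
--     # 优先级 2: 可信 + 任意格式
--     if trusted_urls:
--         return trusted_urls[0]
--
--     # 优先级 3: 非黑名单 + mp3
--     clean_mp3 = [u for u in clean_urls if ".mp3" in u]
--     if clean_mp3:
--         return clean_mp3[0]
--
--     # 优先级 4: 非黑名单 + 任意格式
--     if clean_urls:
--         return clean_urls[0]
--
--     # 全部是黑名单域名，不返回
--     return None
-- ===== SOURCE B (Python) =====
-- TRUSTED_DOMAINS = ("ysxs.top", "ting13.cc", "tingchina.com")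
-- BLACKLISTED_DOMAINS = ("xmcdn.com", "ximalaya.com", "qtfm.cn", "lrts.me",
--                        "kaolafm.net", "kugou.com", "kuwo.cn", "163.com",
--                        "qqmusic.qq.com", "douyin.com", "bytedance",
--                        "googlesyndication", "googleads")
--
-- def _rank(url):
--     """Priority rank of a URL, or None if blacklisted (skip)."""
--     low = url.lower()
--     if any(d in low for d in BLACKLISTED_DOMAINS):
--         return None
--     trusted = any(d in low for d in TRUSTED_DOMAINS)
--     mp3 = ".mp3" in url
--     if trusted:
--         return 1 if mp3 else 2
--     return 3 if mp3 else 4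
--
-- def _pick_best_audio_url(audio_urls):
--     best = None  # (url, rank) of the best candidate so far
--     for u in audio_urls:
--         r = _rank(u)
--         if r is None:
--             continue
--         if best is None or r < best[1]:
--             best = (u, r)
--     return best[0] if best is not None else None
-- ===== Notes on version B (the rewrite author's own statement) =====
-- stated objective: simpler
-- what changed: Replaces the four intermediate filtered lists and cascade of emptiness checks by a single numeric priority rank per URL and one pass tracking the best (lowest-rank, earliest) candidate.
import Mathlib
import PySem

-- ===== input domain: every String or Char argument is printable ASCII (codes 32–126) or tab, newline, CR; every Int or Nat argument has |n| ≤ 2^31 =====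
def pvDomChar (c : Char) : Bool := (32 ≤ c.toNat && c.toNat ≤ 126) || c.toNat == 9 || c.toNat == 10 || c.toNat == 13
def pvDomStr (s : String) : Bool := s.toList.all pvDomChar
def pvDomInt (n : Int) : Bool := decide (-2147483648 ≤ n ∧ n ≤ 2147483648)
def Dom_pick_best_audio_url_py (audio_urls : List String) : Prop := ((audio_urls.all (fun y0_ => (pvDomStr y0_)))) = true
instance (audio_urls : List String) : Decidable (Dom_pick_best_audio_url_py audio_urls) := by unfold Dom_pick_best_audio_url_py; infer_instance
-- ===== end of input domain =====

-- B replaces A's four intermediate filtered lists and cascade of emptiness checks by a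
-- per-URL numeric priority rank and a single pass tracking the best candidate (simpler).


-- ===== PORT A =====
def trustedDomains : List String := ["ysxs.top", "ting13.cc", "tingchina.com"]

def blacklistedDomains : List String :=
  ["xmcdn.com", "ximalaya.com", "qtfm.cn", "lrts.me", "kaolafm.net", "kugou.com",
   "kuwo.cn", "163.com", "qqmusic.qq.com", "douyin.com", "bytedance",
   "googlesyndication", "googleads"]

def is_trusted_audio_url (url : String) : Bool :=
  let url_lower := PySem.Str.lower url
  trustedDomains.any (fun d => PySem.Str.isIn d url_lower)

def is_blacklisted_audio_url (url : String) : Bool :=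
  let url_lower := PySem.Str.lower url
  blacklistedDomains.any (fun d => PySem.Str.isIn d url_lower)

def pick_best_audio_url_py (audio_urls : List String) : Option String :=
  if audio_urls = [] then none
  else
    let clean_urls := audio_urls.filter (fun u => !is_blacklisted_audio_url u)
    let trusted_urls := clean_urls.filter (fun u => is_trusted_audio_url u)
    let trusted_mp3 := trusted_urls.filter (fun u => PySem.Str.isIn ".mp3" u)
    match trusted_mp3 with
    | u :: _ => some u
    | [] =>
      match trusted_urls with
      | u :: _ => some u
      | [] =>
        let clean_mp3 := clean_urls.filter (fun u => PySem.Str.isIn ".mp3" u)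
        match clean_mp3 with
        | u :: _ => some u
        | [] =>
          match clean_urls with
          | u :: _ => some u
          | [] => none

-- ===== PORT B =====
def rankUrl (url : String) : Option Nat :=
  let low := PySem.Str.lower url
  if blacklistedDomains.any (fun d => PySem.Str.isIn d low) then none
  else
    let trusted := trustedDomains.any (fun d => PySem.Str.isIn d low)
    let mp3 := PySem.Str.isIn ".mp3" url
    if trusted then (if mp3 then some 1 else some 2)
    else (if mp3 then some 3 else some 4)

def bestStep (best : Option (String × Nat)) (u : String) : Option (String × Nat) :=
  match rankUrl u with
  | none => best
  | some r =>
    match best with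
    | none => some (u, r)
    | some (b, br) => if r < br then some (u, r) else some (b, br)

def pick_best_audio_url_py_alt (audio_urls : List String) : Option String :=
  (audio_urls.foldl bestStep none).map Prod.fst

-- ===== PRECONDITION & SPEC =====
def Spec_pick_best_audio_url_py (audio_urls : List String) (out : Option String) : Prop := out = pick_best_audio_url_py_alt audio_urls
instance (audio_urls : List String) (out : Option String) : Decidable (Spec_pick_best_audio_url_py audio_urls out) := by unfold Spec_pick_best_audio_url_py; infer_instance

-- ===== CLAIM (what is proved, stated in full; the proofs are below) =====
def Claim_equal_pick_best_audio_url_py : Prop := ∀ (audio_urls : List String), Dom_pick_best_audio_url_py audio_urls → Spec_pick_best_audio_url_py audio_urls (pick_best_audio_url_py audio_urls)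

-- ===== LEMMAS AND PROOFS =====

-- the four filtered lists A builds, as named functions
def cleanL (l : List String) : List String := l.filter (fun u => !is_blacklisted_audio_url u)
def trustL (l : List String) : List String := (cleanL l).filter (fun u => is_trusted_audio_url u)
def tmp3L (l : List String) : List String := (trustL l).filter (fun u => PySem.Str.isIn ".mp3" u)
def cmp3L (l : List String) : List String := (cleanL l).filter (fun u => PySem.Str.isIn ".mp3" u)

-- A's cascade written over the named lists
def cascade (l : List String) : Option String :=
  match tmp3L l with
  | u :: _ => some u
  | [] =>
    match trustL l with
    | u :: _ => some u
    | [] =>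
      match cmp3L l with
      | u :: _ => some u
      | [] =>
        match cleanL l with
        | u :: _ => some u
        | [] => none

lemma pickA_eq_cascade (l : List String) : pick_best_audio_url_py l = cascade l := by
  cases l <;> rfl

lemma rankUrl_eq (u : String) : rankUrl u =
    if is_blacklisted_audio_url u then none
    else if is_trusted_audio_url u then (if PySem.Str.isIn ".mp3" u then some 1 else some 2)
    else if PySem.Str.isIn ".mp3" u then some 3 else some 4 := rfl

-- head-recursive version of B's fold (earliest URL wins ties)
def bestOf : List String → Option (String × Nat)
  | [] => none
  | u :: rest =>
    match rankUrl u, bestOf rest with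
    | none, rb => rb
    | some r, none => some (u, r)
    | some r, some (b, br) => if br < r then some (b, br) else some (u, r)

def combineBest : Option (String × Nat) → Option (String × Nat) → Option (String × Nat)
  | none, y => y
  | some a, none => some a
  | some (b, br), some (c, cr) => if cr < br then some (c, cr) else some (b, br)

lemma foldl_bestStep (l : List String) : ∀ acc,
    l.foldl bestStep acc = combineBest acc (bestOf l) := by
  induction l with
  | nil => intro acc; cases acc <;> rfl
  | cons u rest ih =>
    intro acc
    rw [List.foldl_cons, ih]
    rcases hr : rankUrl u with _ | r <;>
      rcases hb : bestOf rest with _ | ⟨b, br⟩ <;>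
      rcases acc with _ | ⟨a, ar⟩ <;>
      simp [bestStep, bestOf, hr, hb, combineBest] <;>
      split_ifs <;> simp [] <;> split_ifs <;> first | rfl | omega

def rankOf : Option (String × Nat) → Nat
  | none => 5
  | some (_, r) => r

lemma bestOf_char (l : List String) :
    (1 ≤ rankOf (bestOf l)) ∧
    ((bestOf l).map Prod.fst = cascade l) ∧
    (rankOf (bestOf l) ≤ 1 ↔ tmp3L l ≠ []) ∧
    (rankOf (bestOf l) ≤ 2 ↔ trustL l ≠ []) ∧
    (rankOf (bestOf l) ≤ 3 ↔ (trustL l ≠ [] ∨ cmp3L l ≠ [])) ∧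
    (bestOf l = none ↔ cleanL l = []) ∧
    (rankOf (bestOf l) ≤ 4 ∨ bestOf l = none) := by
  induction l with
  | nil => simp [bestOf, cascade, cleanL, trustL, tmp3L, cmp3L, rankOf]
  | cons u rest ih =>
    obtain ⟨ih0, ih1, ih2, ih3, ih4, ih5, ih6⟩ := ih
    cases hb : is_blacklisted_audio_url u
    case true =>
      -- blacklisted: everything unchanged
      have hcl : cleanL (u :: rest) = cleanL rest := by
        simp [cleanL, hb]
      have htr : trustL (u :: rest) = trustL rest := by rw [trustL, hcl]; rfl
      have htm : tmp3L (u :: rest) = tmp3L rest := by rw [tmp3L, htr]; rfl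
      have hcm : cmp3L (u :: rest) = cmp3L rest := by rw [cmp3L, hcl]; rfl
      have hbo : bestOf (u :: rest) = bestOf rest := by
        simp [bestOf, rankUrl_eq, hb]
      have hcas : cascade (u :: rest) = cascade rest := by
        rw [cascade, cascade, htm, htr, hcm, hcl]
      rw [hbo, hcas, htm, htr, hcm, hcl]
      exact ⟨ih0, ih1, ih2, ih3, ih4, ih5, ih6⟩
    case false =>
      have hcl : cleanL (u :: rest) = u :: cleanL rest := by
        simp [cleanL, hb]
      cases ht : is_trusted_audio_url u
      case true =>
        have htr : trustL (u :: rest) = u :: trustL rest := by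
          rw [trustL, hcl]; simp [ ht, trustL]
        cases hm : PySem.Str.isIn ".mp3" u
        case true =>
          -- rank 1
          have hm' : PySem.Chars.isIn ['.', 'm', 'p', '3'] u.toList = true := by simpa using hm
          have htm : tmp3L (u :: rest) = u :: tmp3L rest := by
            rw [tmp3L, htr]; simp [ hm', tmp3L]
          have hr : rankUrl u = some 1 := by rw [rankUrl_eq, hb, ht, hm]; rfl
          have hbo : bestOf (u :: rest) = some (u, 1) := by
            rw [bestOf, hr]
            rcases h : bestOf rest with _ | ⟨b, br⟩
            · rfl
            · have : 1 ≤ br := by simpa [h, rankOf] using ih0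
              simp [show ¬ br < 1 by omega]
          rw [cascade, htm]
          refine ⟨by simp [hbo, rankOf], by simp [hbo], ?_, ?_, ?_, ?_, ?_⟩ <;>
            simp [hbo, rankOf, htr, hcl]
        case false =>
          -- rank 2
          have hm' : PySem.Chars.isIn ['.', 'm', 'p', '3'] u.toList = false := by simpa using hm
          have htm : tmp3L (u :: rest) = tmp3L rest := by
            rw [tmp3L, htr]; simp [ hm', tmp3L]
          have hcm : cmp3L (u :: rest) = cmp3L rest := by
            rw [cmp3L, hcl]; simp [ hm', cmp3L]
          have hr : rankUrl u = some 2 := by rw [rankUrl_eq, hb, ht, hm]; rfl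
          rcases htm3 : tmp3L rest with _ | ⟨b0, tl⟩
          · -- no trusted mp3 in rest: u (rank 2) wins
            have hge : ¬ rankOf (bestOf rest) ≤ 1 := by
              rw [ih2]; simp [htm3]
            have hbo : bestOf (u :: rest) = some (u, 2) := by
              rw [bestOf, hr]
              rcases h : bestOf rest with _ | ⟨b, br⟩
              · rfl
              · have : ¬ br ≤ 1 := by simpa [h, rankOf] using hge
                simp [show ¬ br < 2 by omega]
            rw [cascade, htm, htm3, htr]
            refine ⟨by simp [hbo, rankOf], by simp [hbo], ?_, ?_, ?_, ?_, ?_⟩ <;>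
              simp [hbo, rankOf, hcl]
          · -- rest has a trusted mp3: it wins
            have hle : rankOf (bestOf rest) ≤ 1 := by rw [ih2]; simp [htm3]
            rcases h : bestOf rest with _ | ⟨b, br⟩
            · simp [h, rankOf] at hle
            · have hbr : br ≤ 1 := by simpa [h, rankOf] using hle
              have hb1 : 1 ≤ br := by simpa [h, rankOf] using ih0
              have hbo : bestOf (u :: rest) = some (b, br) := by
                rw [bestOf, hr, h]; simp [show br < 2 by omega]
              have hcas : cascade (u :: rest) = cascade rest := by
                rw [cascade, htm, htm3, cascade, htm3]
              rw [hcas, hbo]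
              have h1 : (bestOf rest).map Prod.fst = cascade rest := ih1
              rw [h] at h1
              refine ⟨by simpa [rankOf] using hb1, h1, ?_, ?_, ?_, ?_, ?_⟩ <;>
                simp [rankOf, htm, htm3, htr, hcl] <;> omega
      case false =>
        have htr : trustL (u :: rest) = trustL rest := by
          rw [trustL, hcl]; simp [ ht, trustL]
        have htm : tmp3L (u :: rest) = tmp3L rest := by rw [tmp3L, htr]; rfl
        cases hm : PySem.Str.isIn ".mp3" u
        case true =>
          -- rank 3
          have hm' : PySem.Chars.isIn ['.', 'm', 'p', '3'] u.toList = true := by simpa using hm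
          have hcm : cmp3L (u :: rest) = u :: cmp3L rest := by
            rw [cmp3L, hcl]; simp [ hm', cmp3L]
          have hr : rankUrl u = some 3 := by rw [rankUrl_eq, hb, ht, hm]; rfl
          rcases htru : trustL rest with _ | ⟨b0, tl⟩
          · -- no trusted in rest: u (rank 3) wins
            have htm3 : tmp3L rest = [] := by rw [tmp3L, htru]; rfl
            have hge : ¬ rankOf (bestOf rest) ≤ 2 := by rw [ih3]; simp [htru]
            have hbo : bestOf (u :: rest) = some (u, 3) := by
              rw [bestOf, hr]
              rcases h : bestOf rest with _ | ⟨b, br⟩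
              · rfl
              · have : ¬ br ≤ 2 := by simpa [h, rankOf] using hge
                simp [show ¬ br < 3 by omega]
            rw [cascade, htm, htm3, htr, htru, hcm]
            refine ⟨by simp [hbo, rankOf], by simp [hbo], ?_, ?_, ?_, ?_, ?_⟩ <;>
              simp [hbo, rankOf, hcl]
          · -- rest has a trusted url: it wins
            have hle : rankOf (bestOf rest) ≤ 2 := by rw [ih3]; simp [htru]
            rcases h : bestOf rest with _ | ⟨b, br⟩
            · simp [h, rankOf] at hle
            · have hbr : br ≤ 2 := by simpa [h, rankOf] using hle
              have hb1 : 1 ≤ br := by simpa [h, rankOf] using ih0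
              have hbo : bestOf (u :: rest) = some (b, br) := by
                rw [bestOf, hr, h]; simp [show br < 3 by omega]
              have hcas : cascade (u :: rest) = cascade rest := by
                rw [cascade, htm, htr, htru, cascade, htru]
              rw [hcas, hbo]
              have h1 : (bestOf rest).map Prod.fst = cascade rest := ih1
              rw [h] at h1
              have i2 := ih2; have i3 := ih3
              rw [h] at i2 i3
              refine ⟨by simpa [rankOf] using hb1, h1, ?_, ?_, ?_, ?_, ?_⟩ <;>
                simp [rankOf, htm, htr, htru, hcm, hcl] <;>
                simp [rankOf, htru] at i2 i3 ⊢ <;> omega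
        case false =>
          -- rank 4
          have hm' : PySem.Chars.isIn ['.', 'm', 'p', '3'] u.toList = false := by simpa using hm
          have hcm : cmp3L (u :: rest) = cmp3L rest := by
            rw [cmp3L, hcl]; simp [ hm', cmp3L]
          have hr : rankUrl u = some 4 := by rw [rankUrl_eq, hb, ht, hm]; rfl
          by_cases h34 : trustL rest ≠ [] ∨ cmp3L rest ≠ []
          · -- something of rank ≤ 3 in rest: it wins
            have hle : rankOf (bestOf rest) ≤ 3 := ih4.mpr h34
            rcases h : bestOf rest with _ | ⟨b, br⟩
            · simp [h, rankOf] at hle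
            · have hbr : br ≤ 3 := by simpa [h, rankOf] using hle
              have hb1 : 1 ≤ br := by simpa [h, rankOf] using ih0
              have hbo : bestOf (u :: rest) = some (b, br) := by
                rw [bestOf, hr, h]; simp [show br < 4 by omega]
              have hcas : cascade (u :: rest) = cascade rest := by
                rw [cascade, htm, htr, hcm, cascade]
                rcases htm3 : tmp3L rest with _ | _
                · rcases htru : trustL rest with _ | _
                  · rcases hcm3 : cmp3L rest with _ | _
                    · exact absurd h34 (by simp [htru, hcm3])
                    · rfl
                  · rfl
                · rfl
              rw [hcas, hbo]
              have h1 : (bestOf rest).map Prod.fst = cascade rest := ih1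
              rw [h] at h1
              have i2 := ih2; have i3 := ih3; have i4 := ih4
              rw [h] at i2 i3 i4
              refine ⟨by simpa [rankOf] using hb1, h1, ?_, ?_, ?_, ?_, ?_⟩ <;>
                simp [rankOf, htm, htr, hcm, hcl] <;>
                simp [rankOf] at i2 i3 i4 ⊢ <;> omega
          · -- nothing better: u (rank 4) wins
            simp only [not_or, ne_eq, not_not] at h34
            obtain ⟨htru, hcm3⟩ := h34
            have htm3 : tmp3L rest = [] := by rw [tmp3L, htru]; rfl
            have hge : ¬ rankOf (bestOf rest) ≤ 3 := by rw [ih4]; simp [htru, hcm3]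
            have hbo : bestOf (u :: rest) = some (u, 4) := by
              rw [bestOf, hr]
              rcases h : bestOf rest with _ | ⟨b, br⟩
              · rfl
              · have : ¬ br ≤ 3 := by simpa [h, rankOf] using hge
                simp [show ¬ br < 4 by omega]
            rw [cascade, htm, htm3, htr, htru, hcm, hcm3, hcl]
            refine ⟨by simp [hbo, rankOf], by simp [hbo], ?_, ?_, ?_, ?_, ?_⟩ <;>
              simp [hbo, rankOf]

-- ===== VERDICT (by name: the statement is the Claim_ definition above) =====
theorem pick_best_audio_url_py_spec : Claim_equal_pick_best_audio_url_py := by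
  intro l _
  unfold Spec_pick_best_audio_url_py
  rw [pickA_eq_cascade, pick_best_audio_url_py_alt, foldl_bestStep]
  exact ((bestOf_char l).2.1).symm
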